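-- pv_equiv track=rewrite | github.com/tcosmo/groupeModulaire | enlacement.py | bin_list_from_word
-- ===== SOURCE A (Python) =====
-- def bin_list_from_word(word):
--     # We translate our L and T words into lists of 0 and 1
--     liste = []
--     for letter in word:
--         if letter == 'L':
--             liste.append(0)
--         elif letter == 'T':
--             liste.append(1)
--         else :
--             raise ValueError("Not an L & T word")
--     return liste
-- ===== SOURCE B (Python) =====
-- def bin_list_from_word(word):
--     # Divide and conquer: split the word in halves, translate each half
--     # recursively, concatenate; a single letter is the base case.
--     def go(s):
--         if len(s) == 0:
--             return []
--         if len(s) == 1: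
--             if s == 'L':
--                 return [0]
--             if s == 'T':
--                 return [1]
--             raise ValueError("Not an L & T word")
--         mid = len(s) // 2
--         return go(s[:mid]) + go(s[mid:])
--     return go(word)
-- ===== Notes on version B (the rewrite author's own statement) =====
-- stated objective: alternative
-- what changed: Replaced A's linear left-to-right accumulator loop by a divide-and-conquer recursion that splits the word in halves, translates each half recursively and concatenates the results.
import Mathlib
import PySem

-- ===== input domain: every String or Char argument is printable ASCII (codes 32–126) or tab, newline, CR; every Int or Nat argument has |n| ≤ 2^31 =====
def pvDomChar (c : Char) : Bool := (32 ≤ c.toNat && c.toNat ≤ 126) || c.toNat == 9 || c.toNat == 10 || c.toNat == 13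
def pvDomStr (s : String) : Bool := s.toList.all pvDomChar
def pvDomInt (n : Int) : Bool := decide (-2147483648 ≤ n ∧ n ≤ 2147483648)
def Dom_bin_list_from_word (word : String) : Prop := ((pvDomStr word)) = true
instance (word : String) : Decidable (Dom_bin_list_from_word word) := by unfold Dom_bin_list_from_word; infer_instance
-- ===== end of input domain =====

-- B translates by divide-and-conquer on halves of the word instead of A's left-to-right accumulator loop (alternative decomposition, same result).

-- ===== PORT A =====
-- A's loop: accumulator `liste`, append 0 for 'L', 1 for 'T'; the raise branch is
-- unreachable under Pre_ (the port returns the accumulator there, value irrelevant).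
def bin_list_from_word (word : String) : List Int :=
  word.toList.foldl
    (fun liste letter =>
      if letter = 'L' then liste ++ [(0 : Int)]
      else if letter = 'T' then liste ++ [(1 : Int)]
      else liste)  -- raise ValueError: excluded by Pre_
    []

-- ===== PORT B =====
-- B's recursive helper `go`: empty → [], single letter → its translation
-- (the raise on an invalid letter is outside Pre_; the port returns [] there),
-- otherwise split at len//2, recurse on both halves and concatenate.
def binGo : List Char → List Int
  | [] => []
  | [c] => if c = 'L' then [(0 : Int)] else if c = 'T' then [(1 : Int)] else []  -- raise: outside Pre_
  | c₁ :: c₂ :: rest =>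
      binGo ((c₁ :: c₂ :: rest).take ((c₁ :: c₂ :: rest).length / 2)) ++
      binGo ((c₁ :: c₂ :: rest).drop ((c₁ :: c₂ :: rest).length / 2))
termination_by s => s.length
decreasing_by
  · simp only [List.length_take, List.length_cons]; omega
  · simp only [List.length_drop, List.length_cons]; omega

def bin_list_from_word_alt (word : String) : List Int := binGo word.toList

-- ===== PRECONDITION & SPEC =====
-- Pre_ excludes exactly the words containing a character other than 'L'/'T', on which A (and B) raises ValueError.
def Pre_bin_list_from_word (word : String) : Prop :=
  (word.toList.all (fun c => c = 'L' ∨ c = 'T')) = true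
instance (word : String) : Decidable (Pre_bin_list_from_word word) := by unfold Pre_bin_list_from_word; infer_instance
def pvWitness_bin_list_from_word : String := "LT"
def Spec_bin_list_from_word (word : String) (out : List Int) : Prop := out = bin_list_from_word_alt word
instance (word : String) (out : List Int) : Decidable (Spec_bin_list_from_word word out) := by unfold Spec_bin_list_from_word; infer_instance

-- ===== CLAIM =====
def Claim_equal_bin_list_from_word : Prop := ∀ (word : String), Dom_bin_list_from_word word → Pre_bin_list_from_word word → Spec_bin_list_from_word word (bin_list_from_word word)

-- ===== LEMMAS AND PROOFS =====
theorem binA_foldl (l : List Char) (acc : List Int)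
    (h : ∀ c ∈ l, c = 'L' ∨ c = 'T') :
    l.foldl
      (fun liste letter =>
        if letter = 'L' then liste ++ [(0 : Int)]
        else if letter = 'T' then liste ++ [(1 : Int)]
        else liste) acc
    = acc ++ l.map (fun letter => if letter = 'T' then (1 : Int) else 0) := by
  induction l generalizing acc with
  | nil => simp
  | cons c l ih =>
    have hc := h c (by simp)
    have hl : ∀ x ∈ l, x = 'L' ∨ x = 'T' := fun x hx => h x (by simp [hx])
    rcases hc with hc | hc <;> subst hc <;> simp [List.foldl, ih _ hl]

theorem binGo_eq_map (n : ℕ) : ∀ (l : List Char), l.length ≤ n →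
    (∀ c ∈ l, c = 'L' ∨ c = 'T') →
    binGo l = l.map (fun letter => if letter = 'T' then (1 : Int) else 0) := by
  induction n with
  | zero =>
    intro l hl _
    have : l = [] := List.eq_nil_of_length_eq_zero (Nat.le_zero.mp hl)
    subst this; simp [binGo]
  | succ n ih =>
    intro l hl h
    match l with
    | [] => simp [binGo]
    | [c] =>
      rcases h c (by simp) with hc | hc <;> subst hc <;> simp [binGo]
    | c₁ :: c₂ :: rest =>
      have hL : (c₁ :: c₂ :: rest).length = rest.length + 2 := by simp
      have h1 : ((c₁ :: c₂ :: rest).take ((c₁ :: c₂ :: rest).length / 2)).length ≤ n := by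
        simp only [List.length_take, hL] at *; omega
      have h2 : ((c₁ :: c₂ :: rest).drop ((c₁ :: c₂ :: rest).length / 2)).length ≤ n := by
        simp only [List.length_drop, hL] at *; omega
      have hm1 : ∀ c ∈ (c₁ :: c₂ :: rest).take ((c₁ :: c₂ :: rest).length / 2), c = 'L' ∨ c = 'T' :=
        fun c hc => h c (List.mem_of_mem_take hc)
      have hm2 : ∀ c ∈ (c₁ :: c₂ :: rest).drop ((c₁ :: c₂ :: rest).length / 2), c = 'L' ∨ c = 'T' :=
        fun c hc => h c (List.mem_of_mem_drop hc)
      rw [binGo, ih _ h1 hm1, ih _ h2 hm2, ← List.map_append, List.take_append_drop]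

-- ===== VERDICT =====
theorem bin_list_from_word_spec : Claim_equal_bin_list_from_word := by
  intro word _ hpre0
  have hpre : ∀ c ∈ word.toList, c = 'L' ∨ c = 'T' := by
    intro c hc
    have h := List.all_eq_true.mp hpre0 c hc
    simpa using h
  unfold Spec_bin_list_from_word bin_list_from_word bin_list_from_word_alt
  rw [binA_foldl _ _ hpre, binGo_eq_map word.toList.length _ le_rfl hpre, List.nil_append]
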